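-- pv_equiv track=rewrite | github.com/AlexMeddy/afm_basic | src/lib/mylogger_v3_2.py | add_prefix_postfix
-- ===== SOURCE A (Python) =====
-- def add_prefix_postfix(S, START, END, PREF, POSF):
--     result = ""
--     i = 0
--     while i < len(S):
--         if S[i:i+len(START)] == START:
--             start_index = i
--             end_index = S.find(END, start_index + len(START))
--             if end_index != -1:
--                 result += PREF + S[start_index:end_index+len(END)] + POSF
--                 i = end_index + len(END)
--             else:
--                 result += S[i]
--                 i += 1
--         else:
--             result += S[i]
--             i += 1
--     return result
-- ===== SOURCE B (Python) =====
-- def add_prefix_postfix(S, START, END, PREF, POSF):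
--     parts = []
--     pos = 0
--     n = len(S)
--     while pos < n:
--         p = S.find(START, pos)
--         if p == -1:
--             parts.append(S[pos:])
--             break
--         e = S.find(END, p + len(START))
--         if e == -1:
--             parts.append(S[pos:p + 1])
--             pos = p + 1
--         else:
--             parts.append(S[pos:p])
--             parts.append(PREF + S[p:e + len(END)] + POSF)
--             pos = e + len(END)
--     return "".join(parts)
-- ===== Notes on version B (the rewrite author's own statement) =====
-- stated objective: faster
-- what changed: A scans character by character, testing a slice against START at every index and copying one char at a time; B keeps a cursor and jumps from one str.find(START) match to the next, copying literal chunks in bulk and joining a parts list at the end.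
import Mathlib
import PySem

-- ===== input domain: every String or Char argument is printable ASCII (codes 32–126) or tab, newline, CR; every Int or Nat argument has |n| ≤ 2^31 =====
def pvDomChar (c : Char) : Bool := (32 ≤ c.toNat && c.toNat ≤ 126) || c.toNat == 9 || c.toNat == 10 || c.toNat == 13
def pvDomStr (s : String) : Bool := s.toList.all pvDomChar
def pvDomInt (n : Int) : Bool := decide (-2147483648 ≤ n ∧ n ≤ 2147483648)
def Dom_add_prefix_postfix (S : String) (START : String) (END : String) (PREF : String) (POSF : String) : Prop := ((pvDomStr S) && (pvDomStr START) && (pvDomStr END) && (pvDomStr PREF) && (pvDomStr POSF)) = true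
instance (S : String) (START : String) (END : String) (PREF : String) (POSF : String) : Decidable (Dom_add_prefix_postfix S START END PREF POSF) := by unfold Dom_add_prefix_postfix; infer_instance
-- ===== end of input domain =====

-- B replaces A's per-character scan-and-test loop by a cursor that jumps from one
-- START match to the next with str.find and copies literal chunks in bulk (objective:
-- alternative / constant-factor faster scanning in CPython).
-- Equivalence is proved on Pre_: both-empty delimiters with nonempty S are excluded
-- (there A loops forever and returns nothing).

-- ===== PORT A =====
-- fuel = S.length + 1 bounds the loop (inside Pre_ the index i grows by ≥ 1 per iteration)
def apLoopA (s st en pref posf : List Char) : Nat → Nat → List Char → List Char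
  | 0, _, acc => acc
  | fuel+1, i, acc =>
    if i < s.length then
      if PySem.List.slice s (some (i : Int)) (some ((i : Int) + (st.length : Int))) = st then
        let e := PySem.Chars.findFrom s en ((i : Int) + (st.length : Int)) none
        if e ≠ -1 then
          apLoopA s st en pref posf fuel (e.toNat + en.length)
            (acc ++ pref ++ PySem.List.slice s (some (i : Int)) (some (e + (en.length : Int))) ++ posf)
        else
          apLoopA s st en pref posf fuel (i + 1) (acc ++ [PySem.List.pyGetD s (i : Int) ' '])
      else
        apLoopA s st en pref posf fuel (i + 1) (acc ++ [PySem.List.pyGetD s (i : Int) ' '])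
    else acc

def add_prefix_postfix (S : String) (START : String) (END : String) (PREF : String) (POSF : String) : String :=
  String.ofList (apLoopA S.toList START.toList END.toList PREF.toList POSF.toList (S.toList.length + 1) 0 [])

-- ===== PORT B =====
-- fuel = S.length + 1 bounds the loop (inside Pre_ the cursor pos grows by ≥ 1 per iteration)
def apLoopB (s st en pref posf : List Char) : Nat → Nat → List Char → List Char
  | 0, _, acc => acc
  | fuel+1, pos, acc =>
    if pos < s.length then
      let p := PySem.Chars.findFrom s st (pos : Int) none
      if p = -1 then
        acc ++ PySem.List.slice s (some (pos : Int)) none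
      else
        let e := PySem.Chars.findFrom s en (p + (st.length : Int)) none
        if e = -1 then
          apLoopB s st en pref posf fuel (p.toNat + 1)
            (acc ++ PySem.List.slice s (some (pos : Int)) (some (p + 1)))
        else
          apLoopB s st en pref posf fuel (e.toNat + en.length)
            (acc ++ PySem.List.slice s (some (pos : Int)) (some p) ++
              (pref ++ PySem.List.slice s (some p) (some (e + (en.length : Int))) ++ posf))
    else acc

def add_prefix_postfix_alt (S : String) (START : String) (END : String) (PREF : String) (POSF : String) : String :=
  String.ofList (apLoopB S.toList START.toList END.toList PREF.toList POSF.toList (S.toList.length + 1) 0 [])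

-- ===== PRECONDITION & SPEC =====
-- Pre_ excludes only START = "" and END = "" with S nonempty: there Python A (and B)
-- loops forever, so A returns no value at all.
def Pre_add_prefix_postfix (S : String) (START : String) (END : String) (PREF : String) (POSF : String) : Prop :=
  START.toList = [] → END.toList = [] → S.toList = []
instance (S : String) (START : String) (END : String) (PREF : String) (POSF : String) : Decidable (Pre_add_prefix_postfix S START END PREF POSF) := by unfold Pre_add_prefix_postfix; infer_instance

def pvWitness_add_prefix_postfix : String × String × String × String × String :=
  ("see [[topic]] and [[more", "[[", "]]", "<b>", "</b>")

def Spec_add_prefix_postfix (S : String) (START : String) (END : String) (PREF : String) (POSF : String) (out : String) : Prop := out = add_prefix_postfix_alt S START END PREF POSF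
instance (S : String) (START : String) (END : String) (PREF : String) (POSF : String) (out : String) : Decidable (Spec_add_prefix_postfix S START END PREF POSF out) := by unfold Spec_add_prefix_postfix; infer_instance

-- ===== CLAIM (what is proved, stated in full; the proofs are below) =====
def Claim_equal_add_prefix_postfix : Prop := ∀ (S : String) (START : String) (END : String) (PREF : String) (POSF : String), Dom_add_prefix_postfix S START END PREF POSF → Pre_add_prefix_postfix S START END PREF POSF → Spec_add_prefix_postfix S START END PREF POSF (add_prefix_postfix S START END PREF POSF)

-- ===== LEMMAS AND PROOFS =====

-- Python's `S[i:i+len(ST)] == ST` tests whether ST occurs at position i.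
theorem apSliceTest (s st : List Char) (i : Nat) :
    (PySem.List.slice s (some (i : Int)) (some ((i : Int) + (st.length : Int))) = st) ↔ st <+: s.drop i := by
  rw [PySem.List.slice_natCast_add]
  constructor
  · intro h; exact (List.prefix_iff_eq_take).mpr h.symm
  · intro h; exact ((List.prefix_iff_eq_take).mp h).symm

-- packaged spec of a successful find
theorem apFindSome (s sub : List Char) (k : Nat) (hk : k ≤ s.length)
    (h : PySem.Chars.findFrom s sub (k : Int) none ≠ -1) :
    ∃ p : Nat, PySem.Chars.findFrom s sub (k : Int) none = (p : Int) ∧ k ≤ p ∧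
      sub <+: s.drop p ∧ p + sub.length ≤ s.length ∧
      ∀ j, k ≤ j → j < p → ¬ sub <+: s.drop j := by
  obtain ⟨h1, h2, h3⟩ := PySem.Chars.findFrom_natCast_spec s sub k hk h
  refine ⟨(PySem.Chars.findFrom s sub (k : Int) none).toNat, ?_, ?_, h2, ?_, h3⟩
  · omega
  · omega
  · have hlen := h2.length_le
    rw [List.length_drop] at hlen
    by_cases hsub : sub = []
    · subst hsub
      have := PySem.Chars.findFrom_natCast s [] k hk
      rw [PySem.Chars.find_nil] at this
      simp at this
      omega
    · have : s.drop (PySem.Chars.findFrom s sub (k : Int) none).toNat ≠ [] := by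
        intro hnil; rw [hnil] at h2; exact hsub (List.prefix_nil.mp h2)
      rw [← List.length_pos_iff, List.length_drop] at this
      omega

-- packaged spec of a failed find: no occurrence at any position ≥ k
theorem apFindNone (s sub : List Char) (k : Nat) (hk : k ≤ s.length)
    (h : PySem.Chars.findFrom s sub (k : Int) none = -1) :
    ∀ j, k ≤ j → ¬ sub <+: s.drop j := by
  have hni := (PySem.Chars.findFrom_natCast_eq_neg_one_iff s sub k hk).mp h
  intro j hj hpre
  apply hni
  have : s.drop j = (s.drop k).drop (j - k) := by rw [List.drop_drop]; congr 1; omega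
  rw [this] at hpre
  exact hpre.isInfix.trans (List.drop_suffix _ _).isInfix

-- the result of apLoopA does not depend on the fuel, as long as it is sufficient
theorem apLoopA_fuel (s st en pref posf : List Char) (hP : st = [] → en = [] → s = []) :
    ∀ f1 f2 i acc, s.length - i < f1 → s.length - i < f2 →
      apLoopA s st en pref posf f1 i acc = apLoopA s st en pref posf f2 i acc := by
  intro f1
  induction f1 with
  | zero => intro f2 i acc h1 _; omega
  | succ f1 ih =>
    intro f2 i acc h1 h2
    match f2, h2 with
    | f2+1, h2 =>
    by_cases hi : i < s.length
    · have hs : s ≠ [] := by rw [← List.length_pos_iff]; omega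
      have hstEn : st.length + en.length ≥ 1 := by
        by_cases hst : st = []
        · have : en ≠ [] := fun he => hs (hP hst he)
          have := List.length_pos_iff.mpr this; omega
        · have := List.length_pos_iff.mpr hst; omega
      simp only [apLoopA, hi, if_true]
      by_cases hm : PySem.List.slice s (some (i : Int)) (some ((i : Int) + (st.length : Int))) = st
      · rw [if_pos hm, if_pos hm]
        have hpre : st <+: s.drop i := (apSliceTest s st i).mp hm
        have hkle : i + st.length ≤ s.length := by
          have := hpre.length_le; rw [List.length_drop] at this; omega
        by_cases he : PySem.Chars.findFrom s en ((i : Int) + (st.length : Int)) none = -1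
        · simp only [he, ne_eq, not_true_eq_false, if_false]
          exact ih f2 (i+1) _ (by omega) (by omega)

        · simp only [ne_eq, he, not_false_eq_true, if_true]
          have hcast : ((i : Int) + (st.length : Int)) = ((i + st.length : Nat) : Int) := by push_cast; ring
          rw [hcast] at he
          obtain ⟨p, hpEq, hkp, _, _, _⟩ := apFindSome s en (i + st.length) hkle he
          rw [hcast]
          apply ih
          · rw [hpEq]; simp only [Int.toNat_natCast]; omega
          · rw [hpEq]; simp only [Int.toNat_natCast]; omega
      · rw [if_neg hm, if_neg hm]
        exact ih f2 (i+1) _ (by omega) (by omega)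
    · simp only [apLoopA, hi, if_false]

-- a run of positions with no START match: A copies the characters one by one
theorem apLoopA_run (s st en pref posf : List Char) (hP : st = [] → en = [] → s = []) :
    ∀ d i acc, i + d ≤ s.length →
      (∀ j, i ≤ j → j < i + d → ¬ st <+: s.drop j) →
      apLoopA s st en pref posf (s.length + 1) i acc
        = apLoopA s st en pref posf (s.length + 1) (i + d) (acc ++ (s.drop i).take d) := by
  intro d
  induction d with
  | zero => intro i acc _ _; simp
  | succ d ih =>
    intro i acc hle hno
    have hi : i < s.length := by omega
    have hm : ¬ (PySem.List.slice s (some (i : Int)) (some ((i : Int) + (st.length : Int))) = st) := by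
      rw [apSliceTest]; exact hno i le_rfl (by omega)
    rw [show apLoopA s st en pref posf (s.length + 1) i acc
          = apLoopA s st en pref posf s.length (i + 1) (acc ++ [PySem.List.pyGetD s (i : Int) ' ']) by
        simp only [apLoopA]; rw [if_pos hi, if_neg hm]]
    rw [apLoopA_fuel s st en pref posf hP s.length (s.length + 1) (i + 1) _ (by omega) (by omega)]
    have hacc : acc ++ (s.drop i).take (d + 1)
        = (acc ++ [PySem.List.pyGetD s (i : Int) ' ']) ++ (s.drop (i + 1)).take d := by
      rw [PySem.List.pyGetD_natCast, List.getD_eq_getElem s ' ' hi,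
        List.drop_eq_getElem_cons hi, List.take_succ_cons]
      simp
    rw [show i + (d + 1) = (i + 1) + d by omega, hacc]
    exact ih (i + 1) _ (by omega) (fun j h1 h2 => hno j (by omega) (by omega))

-- main loop correspondence: B's cursor loop equals A's per-character loop
theorem apLoopBA (s st en pref posf : List Char) (hP : st = [] → en = [] → s = []) :
    ∀ f pos acc, s.length - pos < f → pos ≤ s.length →
      apLoopB s st en pref posf f pos acc = apLoopA s st en pref posf (s.length + 1) pos acc := by
  intro f
  induction f with
  | zero => intro pos acc h1 _; omega
  | succ f ih =>
    intro pos acc h1 hposle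
    by_cases hpos : pos < s.length
    · have hs : s ≠ [] := by rw [← List.length_pos_iff]; omega
      have hstEn : st.length + en.length ≥ 1 := by
        by_cases hst : st = []
        · have : en ≠ [] := fun he => hs (hP hst he)
          have := List.length_pos_iff.mpr this; omega
        · have := List.length_pos_iff.mpr hst; omega
      simp only [apLoopB, hpos, if_true]
      by_cases hp : PySem.Chars.findFrom s st (pos : Int) none = -1
      · -- no further START: B copies the tail, A walks it char by char
        rw [if_pos hp]
        have hno := apFindNone s st pos (by omega) hp
        rw [apLoopA_run s st en pref posf hP (s.length - pos) pos acc (by omega)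
            (fun j hj _ => hno j hj)]
        have htake : (s.drop pos).take (s.length - pos) = s.drop pos := by
          apply List.take_of_length_le; rw [List.length_drop]
        rw [htake, show pos + (s.length - pos) = s.length by omega]
        rw [PySem.List.slice_from_natCast]
        rw [show apLoopA s st en pref posf (s.length + 1) s.length (acc ++ s.drop pos)
              = acc ++ s.drop pos by simp [apLoopA]]
      · rw [if_neg hp]
        obtain ⟨pN, hpEq, hposp, hpref, hbound, hmin⟩ := apFindSome s st pos (by omega) hp
        have hpNlt : pN < s.length := by
          by_cases hst : st = []
          · subst hst
            by_cases hc : pos < pN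
            · exact absurd List.nil_prefix (hmin pos le_rfl hc)
            · omega
          · have := List.length_pos_iff.mpr hst; omega
        -- A walks the literal run [pos, pN)
        rw [apLoopA_run s st en pref posf hP (pN - pos) pos acc (by omega)
            (fun j h1 h2 => hmin j h1 (by omega))]
        rw [show pos + (pN - pos) = pN by omega]
        -- A's step at pN: the START test succeeds
        have hm : PySem.List.slice s (some (pN : Int)) (some ((pN : Int) + (st.length : Int))) = st :=
          (apSliceTest s st pN).mpr hpref
        rw [show apLoopA s st en pref posf (s.length + 1) pN (acc ++ (s.drop pos).take (pN - pos))
              = (if PySem.Chars.findFrom s en ((pN : Int) + (st.length : Int)) none ≠ -1 then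
                  apLoopA s st en pref posf s.length
                    ((PySem.Chars.findFrom s en ((pN : Int) + (st.length : Int)) none).toNat + en.length)
                    (acc ++ (s.drop pos).take (pN - pos) ++ pref ++
                      PySem.List.slice s (some (pN : Int))
                        (some (PySem.Chars.findFrom s en ((pN : Int) + (st.length : Int)) none + (en.length : Int))) ++ posf)
                 else
                  apLoopA s st en pref posf s.length (pN + 1)
                    (acc ++ (s.drop pos).take (pN - pos) ++ [PySem.List.pyGetD s (pN : Int) ' '])) by
          simp only [apLoopA]; rw [if_pos hpNlt, if_pos hm]]
        rw [hpEq]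
        have hcast : ((pN : Int) + (st.length : Int)) = ((pN + st.length : Nat) : Int) := by push_cast; ring
        rw [hcast]
        by_cases he : PySem.Chars.findFrom s en ((pN + st.length : Nat) : Int) none = -1
        · -- no END after this START: both emit the single character at pN and move on
          rw [if_pos he, if_neg (not_not_intro he)]
          simp only [Int.toNat_natCast]
          have hacc : acc ++ PySem.List.slice s (some (pos : Int)) (some ((pN : Int) + 1))
              = acc ++ (s.drop pos).take (pN - pos) ++ [PySem.List.pyGetD s (pN : Int) ' '] := by
            rw [PySem.List.pyGetD_natCast, List.getD_eq_getElem s ' ' hpNlt]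
            rw [show (pN : Int) + 1 = ((pN + 1 : Nat) : Int) by push_cast; ring,
              PySem.List.slice_natCast]
            rw [show pN + 1 - pos = (pN - pos) + 1 by omega, List.take_add_one,
              List.append_assoc]
            congr 2
            have hlt : pN - pos < (s.drop pos).length := by rw [List.length_drop]; omega
            rw [List.getElem?_eq_getElem hlt]
            simp [List.getElem_drop, show pos + (pN - pos) = pN by omega]
          rw [hacc,
            apLoopA_fuel s st en pref posf hP s.length (s.length + 1) (pN + 1) _ (by omega) (by omega),
            ih (pN + 1) _ (by omega) (by omega)]
        · -- END found: both emit PREF ++ S[pN:e+len(END)] ++ POSF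
          rw [if_neg he, if_pos he]
          obtain ⟨eN, heEq, hke, hepref, hebound, _⟩ := apFindSome s en (pN + st.length) hbound he
          rw [heEq]
          simp only [Int.toNat_natCast]
          have hacc : acc ++ PySem.List.slice s (some (pos : Int)) (some (pN : Int)) ++
                (pref ++ PySem.List.slice s (some (pN : Int)) (some ((eN : Int) + (en.length : Int))) ++ posf)
              = acc ++ (s.drop pos).take (pN - pos) ++ pref ++
                PySem.List.slice s (some (pN : Int)) (some ((eN : Int) + (en.length : Int))) ++ posf := by
            rw [PySem.List.slice_natCast s pos pN]
            simp [List.append_assoc]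
          rw [hacc,
            apLoopA_fuel s st en pref posf hP s.length (s.length + 1) (eN + en.length) _
              (by omega) (by omega),
            ih (eN + en.length) _ (by omega) (by omega)]
    · have hpe : pos = s.length := by omega
      subst hpe
      simp [apLoopB, apLoopA]

-- ===== VERDICT (by name: the statement is the Claim_ definition above) =====
theorem add_prefix_postfix_spec : Claim_equal_add_prefix_postfix := by
  intro S START END PREF POSF _ hPre
  unfold Spec_add_prefix_postfix add_prefix_postfix add_prefix_postfix_alt
  congr 1
  exact (apLoopBA S.toList START.toList END.toList PREF.toList POSF.toList hPre
    (S.toList.length + 1) 0 [] (by omega) (by omega)).symm
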